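-- pv_equiv track=rewrite | github.com/nkavtur/python-examples | src/algorithms/amazon/wheels_count.py | fleet_count1
-- ===== SOURCE A (Python) =====
-- def fleet_count1(wheels):
--     count = 1
--     while wheels > 2:
--         if wheels % 2 == 0:
--             wheels = wheels - 4
--         else:
--             wheels -= 2
--         count += 1
--
--     return count
-- ===== SOURCE B (Python) =====
-- def fleet_count1(wheels):
--     # Closed form instead of simulating the loop: constant-time arithmetic.
--     if wheels <= 2:
--         return 1
--     if wheels % 2:
--         return (wheels + 1) // 2
--     return 1 + (wheels + 1) // 4
-- ===== Notes on version B (the rewrite author's own statement) =====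
-- stated objective: faster
-- what changed: Replaced the step-by-step simulation loop with a closed-form arithmetic formula (one parity test and one floor division) derived from the fixed per-step decrement.
import Mathlib
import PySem

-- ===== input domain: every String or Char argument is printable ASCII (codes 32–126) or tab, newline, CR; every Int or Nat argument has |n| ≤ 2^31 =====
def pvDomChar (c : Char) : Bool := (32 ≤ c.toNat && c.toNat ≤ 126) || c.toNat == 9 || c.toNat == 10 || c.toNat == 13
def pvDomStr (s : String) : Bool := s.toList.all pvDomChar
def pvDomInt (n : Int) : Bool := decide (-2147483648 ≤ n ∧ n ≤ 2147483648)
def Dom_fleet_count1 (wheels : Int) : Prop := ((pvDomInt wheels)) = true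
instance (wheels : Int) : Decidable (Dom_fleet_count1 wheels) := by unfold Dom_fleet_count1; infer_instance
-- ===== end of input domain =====

-- B replaces A's step-by-step simulation loop by a closed-form arithmetic formula (measured faster on large inputs).

-- ===== PORT A =====
-- literal transliteration of A's while-loop as recursion on the loop state (wheels, count)
def fleet_count1_loop (wheels : Int) (count : Int) : Int :=
  if wheels > 2 then
    if PySem.Int.mod wheels 2 = 0 then fleet_count1_loop (wheels - 4) (count + 1)
    else fleet_count1_loop (wheels - 2) (count + 1)
  else count
termination_by wheels.toNat
decreasing_by all_goals simp_all [PySem.Int.mod]; omega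

def fleet_count1 (wheels : Int) : Int := fleet_count1_loop wheels 1

-- ===== PORT B =====
def fleet_count1_alt (wheels : Int) : Int :=
  if wheels ≤ 2 then 1
  else if PySem.Int.mod wheels 2 ≠ 0 then PySem.Int.floordiv (wheels + 1) 2
  else 1 + PySem.Int.floordiv (wheels + 1) 4

-- ===== PRECONDITION & SPEC =====
def Spec_fleet_count1 (wheels : Int) (out : Int) : Prop := out = fleet_count1_alt wheels
instance (wheels : Int) (out : Int) : Decidable (Spec_fleet_count1 wheels out) := by unfold Spec_fleet_count1; infer_instance

-- ===== CLAIM (what is proved, stated in full; the proofs are below) =====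
def Claim_equal_fleet_count1 : Prop := ∀ (wheels : Int), Dom_fleet_count1 wheels → Spec_fleet_count1 wheels (fleet_count1 wheels)

-- ===== LEMMAS AND PROOFS =====
theorem mod2 (a : Int) : PySem.Int.mod a 2 = a % 2 :=
  PySem.Int.mod_eq_emod_of_pos (by norm_num)

theorem fd2 (a : Int) : PySem.Int.floordiv a 2 = a / 2 :=
  PySem.Int.floordiv_eq_ediv_of_pos (by norm_num)

theorem fd4 (a : Int) : PySem.Int.floordiv a 4 = a / 4 :=
  PySem.Int.floordiv_eq_ediv_of_pos (by norm_num)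

-- loop invariant: the loop returns (count - 1) plus the closed-form value of its wheels argument
theorem fleet_count1_loop_eq (wheels count : Int) :
    fleet_count1_loop wheels count = count - 1 + fleet_count1_alt wheels := by
  induction wheels, count using fleet_count1_loop.induct with
  | case1 w c hgt heven ih =>
      rw [fleet_count1_loop, if_pos hgt, if_pos heven, ih]
      rw [mod2] at heven
      simp only [fleet_count1_alt, mod2, fd2, fd4]
      split_ifs <;> omega
  | case2 w c hgt hodd ih =>
      rw [fleet_count1_loop, if_pos hgt, if_neg hodd, ih]
      rw [mod2] at hodd
      simp only [fleet_count1_alt, mod2, fd2, fd4]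
      split_ifs <;> omega
  | case3 w c hle =>
      rw [fleet_count1_loop, if_neg hle]
      simp only [fleet_count1_alt]
      rw [if_pos (by omega)]
      omega

-- ===== VERDICT (by name: the statement is the Claim_ definition above) =====
theorem fleet_count1_spec : Claim_equal_fleet_count1 := by
  intro w _
  unfold Spec_fleet_count1 fleet_count1
  rw [fleet_count1_loop_eq]
  omega
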